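-- pv_equiv track=rewrite | github.com/CookIsGood/pdf-finder | services/DocumentService.py | find_min_area
-- ===== SOURCE A (Python) =====
-- def find_min_area(blocks: list):
--     res, cords = [], []
--     for item in blocks:
--         for elem in item:
--             res.append(elem[0])
--             cords.append(elem[1])
--     try:
--         index = res.index(min(res))
--         return cords, index
--     except ValueError:
--         raise ValueError("Failed to calculate coordinates")
-- ===== SOURCE B (Python) =====
-- def find_min_area(blocks: list):
--     cords = []
--     best_area = None
--     best_index = None
--     for item in blocks:
--         for elem in item:
--             if best_area is None or elem[0] < best_area:
--                 best_area = elem[0]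
--                 best_index = len(cords)
--             cords.append(elem[1])
--     if best_index is None:
--         raise ValueError("Failed to calculate coordinates")
--     return cords, best_index
-- ===== Notes on version B (the rewrite author's own statement) =====
-- stated objective: alternative
-- what changed: Replaced the res list plus the min()+index() double scan with a single pass that maintains a running minimum area and its flattened index (strict <, so the first minimum wins, matching list.index).
import Mathlib
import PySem

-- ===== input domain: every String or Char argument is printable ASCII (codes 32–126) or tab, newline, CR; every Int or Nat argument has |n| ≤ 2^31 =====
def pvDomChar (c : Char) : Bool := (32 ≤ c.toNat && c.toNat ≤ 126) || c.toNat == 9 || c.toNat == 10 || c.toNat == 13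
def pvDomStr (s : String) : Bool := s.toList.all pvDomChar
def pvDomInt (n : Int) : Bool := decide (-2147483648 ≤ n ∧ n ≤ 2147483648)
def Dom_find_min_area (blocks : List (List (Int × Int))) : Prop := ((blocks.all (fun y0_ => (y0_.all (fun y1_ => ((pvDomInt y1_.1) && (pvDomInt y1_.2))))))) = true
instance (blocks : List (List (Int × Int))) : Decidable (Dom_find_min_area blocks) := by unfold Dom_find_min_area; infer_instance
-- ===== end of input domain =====

-- B replaces A's res list and min()+index() double scan by one pass keeping a running minimum
-- area and its flattened index (alternative decomposition; neither program mutates its input).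

-- ===== PORT A =====
-- res/cords accumulation: nested foldl over blocks, appending elem[0] to res and elem[1] to cords
def find_min_area (blocks : List (List (Int × Int))) : List Int × Int :=
  let st := blocks.foldl
    (fun st item => item.foldl (fun st e => (st.1 ++ [e.1], st.2 ++ [e.2])) st)
    (([] : List Int), ([] : List Int))
  match PySem.List.min? st.1 (fun x => x) with
  | none => ([], 0)        -- min([]) raises ValueError → re-raise; excluded by Pre_
  | some m =>
    match PySem.List.index? st.1 m with
    | none => ([], 0)      -- unreachable: m ∈ res
    | some i => (st.2, (i : Int))

-- ===== PORT B =====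
-- state = (cords, best_area : Option Int, best_index : Option Int)
def pvBStep (st : List Int × Option Int × Option Int) (e : Int × Int) :
    List Int × Option Int × Option Int :=
  let upd : Bool := match st.2.1 with
    | none => true
    | some a => decide (e.1 < a)
  if upd then (st.1 ++ [e.2], some e.1, some (st.1.length : Int))
  else (st.1 ++ [e.2], st.2.1, st.2.2)

def find_min_area_alt (blocks : List (List (Int × Int))) : List Int × Int :=
  let st := blocks.foldl (fun st item => item.foldl pvBStep st)
    (([] : List Int), (none : Option Int), (none : Option Int))
  match st.2.2 with
  | none => ([], 0)        -- best_index is None → raise ValueError; excluded by Pre_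
  | some i => (st.1, i)

-- ===== PRECONDITION & SPEC =====
-- Pre_ excludes inputs whose flattened element list is empty: there A (and B) raise ValueError.
def Pre_find_min_area (blocks : List (List (Int × Int))) : Prop := blocks.flatten ≠ []
instance (blocks : List (List (Int × Int))) : Decidable (Pre_find_min_area blocks) := by unfold Pre_find_min_area; infer_instance
def pvWitness_find_min_area : (List (List (Int × Int))) := [[(3, 7)], [(1, 9), (1, 4)]]

def Spec_find_min_area (blocks : List (List (Int × Int))) (out : List Int × Int) : Prop := out = find_min_area_alt blocks
instance (blocks : List (List (Int × Int))) (out : List Int × Int) : Decidable (Spec_find_min_area blocks out) := by unfold Spec_find_min_area; infer_instance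

-- ===== CLAIM (what is proved, stated in full; the proofs are below) =====
def Claim_equal_find_min_area : Prop := ∀ (blocks : List (List (Int × Int))), Dom_find_min_area blocks → Pre_find_min_area blocks → Spec_find_min_area blocks (find_min_area blocks)

-- ===== LEMMAS AND PROOFS =====

-- first argmin (value, index) of a list of ints
def pvArgmin : List Int → Option (Int × Nat)
  | [] => none
  | a :: t =>
    match pvArgmin t with
    | none => some (a, 0)
    | some (m, i) => if a ≤ m then some (a, 0) else some (m, i + 1)

theorem pvArgmin_eq_none {l : List Int} : pvArgmin l = none ↔ l = [] := by
  cases l with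
  | nil => simp [pvArgmin]
  | cons a t =>
    simp only [pvArgmin]
    cases pvArgmin t with
    | none => simp
    | some p => by_cases h : a ≤ p.1 <;> simp [h]

theorem pvArgmin_min {l : List Int} {m : Int} {i : Nat} (h : pvArgmin l = some (m, i)) :
    m ∈ l ∧ ∀ y ∈ l, m ≤ y := by
  induction l generalizing m i with
  | nil => simp [pvArgmin] at h
  | cons a t ih =>
    cases ht : pvArgmin t with
    | none =>
      have h0 : t = [] := pvArgmin_eq_none.mp ht
      subst h0
      simp only [pvArgmin] at h
      obtain ⟨rfl, rfl⟩ : a = m ∧ 0 = i := by simpa using h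
      simp
    | some p =>
      obtain ⟨hp1, hp2⟩ := ih (m := p.1) (i := p.2) (by simpa using ht)
      simp only [pvArgmin, ht] at h
      by_cases hle : a ≤ p.1
      · simp only [hle, if_pos] at h
        obtain ⟨rfl, rfl⟩ : a = m ∧ 0 = i := by simpa using h
        refine ⟨List.mem_cons_self, ?_⟩
        intro y hy
        rcases List.mem_cons.mp hy with rfl | hy
        · exact le_refl _
        · exact le_trans hle (hp2 y hy)
      · simp only [hle, if_neg, not_false_iff] at h
        obtain ⟨rfl, rfl⟩ : p.1 = m ∧ p.2 + 1 = i := by simpa using h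
        refine ⟨List.mem_cons_of_mem _ hp1, ?_⟩
        intro y hy
        rcases List.mem_cons.mp hy with rfl | hy
        · omega
        · exact hp2 y hy

theorem pvArgmin_index {l : List Int} {m : Int} {i : Nat} (h : pvArgmin l = some (m, i)) :
    PySem.List.index? l m = some i := by
  induction l generalizing m i with
  | nil => simp [pvArgmin] at h
  | cons a t ih =>
    cases ht : pvArgmin t with
    | none =>
      have h0 : t = [] := pvArgmin_eq_none.mp ht
      subst h0
      simp only [pvArgmin] at h
      obtain ⟨rfl, rfl⟩ : a = m ∧ 0 = i := by simpa using h
      exact PySem.List.index?_cons_self a []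
    | some p =>
      simp only [pvArgmin, ht] at h
      by_cases hle : a ≤ p.1
      · simp only [hle, if_pos] at h
        obtain ⟨rfl, rfl⟩ : a = m ∧ 0 = i := by simpa using h
        exact PySem.List.index?_cons_self a t
      · simp only [hle, if_neg, not_false_iff] at h
        obtain ⟨rfl, rfl⟩ : p.1 = m ∧ p.2 + 1 = i := by simpa using h
        have hne : a ≠ p.1 := by omega
        rw [PySem.List.index?_cons_of_ne t hne, ih ht]
        rfl

-- A's nested accumulation builds (map fst, map snd) of the flattened list
theorem pvAfold_inner (item : List (Int × Int)) (r c : List Int) :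
    item.foldl (fun st e => (st.1 ++ [e.1], st.2 ++ [e.2])) (r, c)
      = (r ++ item.map Prod.fst, c ++ item.map Prod.snd) := by
  induction item generalizing r c with
  | nil => simp
  | cons e t ih => simp [List.foldl_cons, ih]

theorem pvAfold (blocks : List (List (Int × Int))) (r c : List Int) :
    blocks.foldl (fun st item => item.foldl (fun st e => (st.1 ++ [e.1], st.2 ++ [e.2])) st) (r, c)
      = (r ++ blocks.flatten.map Prod.fst, c ++ blocks.flatten.map Prod.snd) := by
  induction blocks generalizing r c with
  | nil => simp
  | cons it bs ih => simp [List.foldl_cons, pvAfold_inner, ih]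

-- B's nested fold over blocks equals the fold over the flattened list
theorem pvBfold_flatten (blocks : List (List (Int × Int)))
    (st : List Int × Option Int × Option Int) :
    blocks.foldl (fun st item => item.foldl pvBStep st) st
      = blocks.flatten.foldl pvBStep st := by
  induction blocks generalizing st with
  | nil => rfl
  | cons it bs ih => simp [List.foldl_cons, List.flatten_cons, List.foldl_append, ih]

-- invariant of B's fold once a best value is present
theorem pvBfold_some (es : List (Int × Int)) (c0 : List Int) (a : Int) (j : Int) :
    es.foldl pvBStep (c0, some a, some j)
      = (c0 ++ es.map Prod.snd,
         match pvArgmin (es.map Prod.fst) with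
         | none => (some a, some j)
         | some (m, i) =>
           if m < a then (some m, some ((c0.length : Int) + i)) else (some a, some j)) := by
  induction es generalizing c0 a j with
  | nil => simp [pvArgmin]
  | cons e t ih =>
    simp only [List.foldl_cons, pvBStep]
    by_cases hlt : e.1 < a
    · simp only [hlt, decide_true, if_pos]
      rw [ih]
      simp only [List.map_cons, pvArgmin]
      cases ht : pvArgmin (t.map Prod.fst) with
      | none =>
        simp [hlt]
      | some p =>
        obtain ⟨m, i⟩ := p
        by_cases hle : e.1 ≤ m
        · have : ¬ m < e.1 := by omega
          simp [hle, this, hlt]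
        · have hm : m < e.1 := by omega
          have hma : m < a := by omega
          simp only [hle, if_neg, not_false_iff, hm, if_pos, hma]
          simp [List.append_assoc]
          try omega
    · simp only [hlt, decide_false, if_neg, Bool.false_eq_true, not_false_iff]
      rw [ih]
      simp only [List.map_cons, pvArgmin]
      cases ht : pvArgmin (t.map Prod.fst) with
      | none =>
        simp [hlt]
      | some p =>
        obtain ⟨m, i⟩ := p
        by_cases hle : e.1 ≤ m
        · have h1 : ¬ m < a := by omega
          have h2 : ¬ e.1 < a := hlt
          simp [hle, h1, h2]
        · have hm : m < e.1 := by omega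
          simp only [hle, if_neg, not_false_iff]
          by_cases hma : m < a
          · simp [hma, List.append_assoc]
            try omega
          · simp [hma]

-- ===== VERDICT (by name: the statement is the Claim_ definition above) =====
theorem find_min_area_spec : Claim_equal_find_min_area := by
  intro blocks _ hpre
  unfold Spec_find_min_area
  obtain ⟨e, t, hes⟩ : ∃ e t, blocks.flatten = e :: t := by
    cases h : blocks.flatten with
    | nil => exact absurd h hpre
    | cons e t => exact ⟨e, t, rfl⟩
  obtain ⟨m, i, hp⟩ : ∃ m i, pvArgmin (e.1 :: t.map Prod.fst) = some (m, i) := by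
    cases h : pvArgmin (e.1 :: t.map Prod.fst) with
    | none => exact absurd (pvArgmin_eq_none.mp h) (by simp)
    | some p => exact ⟨p.1, p.2, by simp only [h]⟩
  obtain ⟨hmem, hmin⟩ := pvArgmin_min hp
  -- A's min?/index? computation yields exactly (m, i)
  have hmin? : PySem.List.min? (e.1 :: t.map Prod.fst) (fun x => x) = some m := by
    cases hm' : PySem.List.min? (e.1 :: t.map Prod.fst) (fun x => x) with
    | none => exact absurd ((PySem.List.min?_eq_none_iff _ _).mp hm') (by simp)
    | some m' =>
      have h1 : m' ∈ e.1 :: t.map Prod.fst := PySem.List.min?_mem hm'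
      have h2 := PySem.List.min?_isMin hm'
      have : m' = m := le_antisymm (h2 m hmem) (hmin m' h1)
      rw [this]
  have hidx : PySem.List.index? (e.1 :: t.map Prod.fst) m = some i := pvArgmin_index hp
  -- evaluate A
  have hA : find_min_area blocks = (e.2 :: t.map Prod.snd, (i : Int)) := by
    simp only [find_min_area, pvAfold, List.nil_append, hes, List.map_cons]
    rw [hmin?]
    rw [PySem.List.index?_eq_idxOf?] at hidx
    simp [hidx]
  -- evaluate B
  have hB : find_min_area_alt blocks = (e.2 :: t.map Prod.snd, (i : Int)) := by
    simp only [find_min_area_alt, pvBfold_flatten, hes, List.foldl_cons]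
    have hstep : pvBStep ([], none, none) e = ([e.2], some e.1, some 0) := by
      simp [pvBStep]
    rw [hstep, pvBfold_some]
    simp only [pvArgmin] at hp
    cases ht : pvArgmin (t.map Prod.fst) with
    | none =>
      rw [ht] at hp
      obtain ⟨rfl, rfl⟩ : e.1 = m ∧ 0 = i := by simpa using hp
      simp
    | some p =>
      obtain ⟨m', i'⟩ := p
      rw [ht] at hp
      by_cases hle : e.1 ≤ m'
      · simp only [hle, if_pos] at hp
        obtain ⟨rfl, rfl⟩ : e.1 = m ∧ 0 = i := by simpa using hp
        have : ¬ m' < e.1 := by omega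
        simp [this]
      · simp only [hle, if_neg, not_false_iff] at hp
        have hlt : m' < e.1 := by omega
        obtain ⟨rfl, rfl⟩ : m' = m ∧ i' + 1 = i := by simpa using hp
        simp [hlt]
        omega
  rw [hA, hB]
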